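-- pv_equiv track=rewrite | github.com/ysjwdaypm/study | python/pyfiles/phone.py | createPhoneCode
-- ===== SOURCE A (Python) =====
-- def createPhoneCode(phoneCode):
-- 	codeSet = []
-- 	indices = []
--
-- 	for code in phoneCode:
-- 		if not code in codeSet:
-- 			codeSet.append(code)
-- 		index = -1
-- 		for c in codeSet:
-- 			index = index + 1
-- 			if c ==  code:
-- 				indices.append(str(index))
--
-- 	str1 = "\"" + ''.join(codeSet) + "\""
-- 	str2 = "\"" + ''.join(indices) + "\""
-- 	ret = "''.join([%s[int(i)] for i in %s])"%(str1,str2)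
-- 	ret = ret + "\n"
-- 	ret = ret + "string.gsub(%s,\"%s\",function(i)return string.sub(%s,tonumber(i)+1,tonumber(i)+1) end)"%(str2,"%d",str1)
-- 	return ret
-- ===== SOURCE B (Python) =====
-- def createPhoneCode(phoneCode):
-- 	# Group the positions of each character (first-seen key order), then
-- 	# scatter each character's rank into a preallocated output array.
-- 	positions = {}
-- 	for p, c in enumerate(phoneCode):
-- 		positions.setdefault(c, []).append(p)
-- 	out = [None] * len(phoneCode)
-- 	for rank, ps in enumerate(positions.values()):
-- 		for p in ps:
-- 			out[p] = str(rank)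
-- 	str1 = "\"" + ''.join(positions) + "\""
-- 	str2 = "\"" + ''.join(out) + "\""
-- 	ret = "''.join([%s[int(i)] for i in %s])" % (str1, str2)
-- 	ret += "\n"
-- 	ret += "string.gsub(%s,\"%s\",function(i)return string.sub(%s,tonumber(i)+1,tonumber(i)+1) end)" % (str2, "%d", str1)
-- 	return ret
-- ===== Notes on version B (the rewrite author's own statement) =====
-- stated objective: faster
-- what changed: B inverts the traversal: one pass groups each character's positions into a dict of position lists, then a scatter pass writes each group's rank into a preallocated output array, so no index is emitted while scanning characters and A's O(k) inner scan per character disappears.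
import Mathlib
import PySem

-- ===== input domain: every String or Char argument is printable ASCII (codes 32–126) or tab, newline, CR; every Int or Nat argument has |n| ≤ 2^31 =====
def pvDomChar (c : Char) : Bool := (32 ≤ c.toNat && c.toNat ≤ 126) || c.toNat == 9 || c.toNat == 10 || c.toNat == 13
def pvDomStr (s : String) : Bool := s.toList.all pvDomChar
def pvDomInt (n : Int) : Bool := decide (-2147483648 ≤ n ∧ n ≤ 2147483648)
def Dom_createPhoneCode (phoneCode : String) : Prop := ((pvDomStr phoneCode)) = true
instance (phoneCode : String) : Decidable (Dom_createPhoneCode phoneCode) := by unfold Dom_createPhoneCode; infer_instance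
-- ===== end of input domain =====

-- B inverts the traversal: group each char's positions in one pass, then scatter ranks into a
-- preallocated output array — removing A's O(k) inner scan per character; objective: faster.

-- ===== PORT A =====
-- one iteration of A's outer loop: dedup-append, then the inner scan over codeSet appending str(index) on match
def pvAStep (st : List Char × List String) (code : Char) : List Char × List String :=
  let codeSet := if !(decide (code ∈ st.1)) then st.1 ++ [code] else st.1
  let r := codeSet.foldl (fun (p : Int × List String) c =>
      let index := p.1 + 1
      (index, if c == code then p.2 ++ [PySem.Int.toStr index] else p.2)) (-1, st.2)
  (codeSet, r.2)

def createPhoneCode (phoneCode : String) : String :=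
  let st := phoneCode.toList.foldl pvAStep ([], [])
  let str1 := "\"" ++ String.ofList st.1 ++ "\""
  let str2 := "\"" ++ PySem.Str.join "" st.2 ++ "\""
  let ret := "''.join([" ++ str1 ++ "[int(i)] for i in " ++ str2 ++ "])"
  let ret := ret ++ "\n"
  ret ++ "string.gsub(" ++ str2 ++ ",\"%d\",function(i)return string.sub(" ++ str1 ++ ",tonumber(i)+1,tonumber(i)+1) end)"

-- ===== PORT B =====
def createPhoneCode_alt (phoneCode : String) : String :=
  let l := phoneCode.toList
  -- positions.setdefault(c, []).append(p) mutates the stored list in place: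
  -- net effect positions[c] = positions.get(c, []) + [p], keeping position = Dict.modify
  let positions : PySem.Dict Char (List Int) :=
    (PySem.List.enumerate l).foldl (fun d q => d.modify q.2 [] (· ++ [q.1])) PySem.Dict.empty
  -- out = [None]*len(phoneCode), then out[p] = str(rank); positions p are enumerate indices, 0 ≤ p < len
  let out : List (Option String) := List.replicate l.length none
  let out := (PySem.List.enumerate positions.values).foldl
      (fun o g => g.2.foldl (fun o p => o.set p.toNat (some (PySem.Int.toStr g.1))) o) out
  let str1 := "\"" ++ String.ofList positions.keys ++ "\""
  -- every slot of out is written, so ''.join(out) is the join of the stored strings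
  let str2 := "\"" ++ PySem.Str.join "" (out.map (fun o => o.getD "")) ++ "\""
  let ret := "''.join([" ++ str1 ++ "[int(i)] for i in " ++ str2 ++ "])"
  let ret := ret ++ "\n"
  ret ++ "string.gsub(" ++ str2 ++ ",\"%d\",function(i)return string.sub(" ++ str1 ++ ",tonumber(i)+1,tonumber(i)+1) end)"

-- ===== PRECONDITION & SPEC =====
def Spec_createPhoneCode (phoneCode : String) (out : String) : Prop := out = createPhoneCode_alt phoneCode
instance (phoneCode : String) (out : String) : Decidable (Spec_createPhoneCode phoneCode out) := by unfold Spec_createPhoneCode; infer_instance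

-- ===== CLAIM =====
def Claim_equal_createPhoneCode : Prop := ∀ (phoneCode : String), Dom_createPhoneCode phoneCode → Spec_createPhoneCode phoneCode (createPhoneCode phoneCode)

-- ===== LEMMAS AND PROOFS =====

-- ---------- A side ----------

theorem pvInner_not_mem (code : Char) (cs : List Char) (i0 : Int) (acc : List String)
    (h : code ∉ cs) :
    cs.foldl (fun (p : Int × List String) c =>
      let index := p.1 + 1
      (index, if c == code then p.2 ++ [PySem.Int.toStr index] else p.2)) (i0, acc)
    = (i0 + cs.length, acc) := by
  induction cs generalizing i0 with
  | nil => simp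
  | cons x rest ih =>
    simp only [List.mem_cons, not_or] at h
    have hx : (x == code) = false := by
      simp only [beq_eq_false_iff_ne]
      exact fun e => h.1 e.symm
    rw [List.foldl_cons]
    simp only [hx, Bool.false_eq_true, if_false]
    rw [ih (i0 + 1) h.2]
    refine Prod.ext ?_ rfl
    show i0 + 1 + (rest.length : Int) = i0 + ((x :: rest).length : Int)
    simp only [List.length_cons]
    push_cast
    omega

theorem pvInner_mem (code : Char) (cs : List Char) (i0 : Int) (acc : List String)
    (hnd : cs.Nodup) (h : code ∈ cs) :
    (cs.foldl (fun (p : Int × List String) c =>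
      let index := p.1 + 1
      (index, if c == code then p.2 ++ [PySem.Int.toStr index] else p.2)) (i0, acc)).2
    = acc ++ [PySem.Int.toStr (i0 + 1 + (cs.idxOf code : Int))] := by
  induction cs generalizing i0 acc with
  | nil => simp at h
  | cons x rest ih =>
    rcases List.nodup_cons.mp hnd with ⟨hx0, hnd2⟩
    by_cases hx : x = code
    · rw [List.foldl_cons]
      have hxb : (x == code) = true := by simp [hx]
      simp only [hxb, if_true]
      have hr : code ∉ rest := by rw [← hx]; exact hx0
      have := congrArg Prod.snd (pvInner_not_mem code rest (i0 + 1)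
        (acc ++ [PySem.Int.toStr (i0 + 1)]) hr)
      rw [this]
      rw [hx, List.idxOf_cons_self]
      norm_num
    · have hxb : (x == code) = false := by
        simp only [beq_eq_false_iff_ne]; exact hx
      have hr : code ∈ rest := by
        rcases List.mem_cons.mp h with h2 | h2
        · exact absurd h2.symm hx
        · exact h2
      rw [List.foldl_cons]
      simp only [hxb, Bool.false_eq_true, if_false]
      rw [ih (i0 + 1) acc hnd2 hr]
      have hix : (x :: rest).idxOf code = rest.idxOf code + 1 := by
        rw [List.idxOf_cons_ne]
        exact fun e => hx e
      have harith : i0 + 1 + 1 + ((rest.idxOf code : Nat) : Int)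
          = i0 + 1 + ((rest.idxOf code + 1 : Nat) : Int) := by push_cast; ring
      rw [hix, harith]

theorem pvCs_add (cs : List Char) (c : Char) :
    (if !(decide (c ∈ cs)) then cs ++ [c] else cs) = PySem.Set.add cs c := by
  by_cases h : c ∈ cs <;> simp [h]

theorem pvIdxOf_update (cs : List Char) (l : List Char) (c : Char) (h : c ∈ cs) :
    (PySem.Set.update cs l).idxOf c = cs.idxOf c := by
  rw [PySem.Set.update_eq_append_filter]
  exact List.idxOf_append_of_mem h

theorem pvMain (l : List Char) (cs : List Char) (inds : List String) (hnd : cs.Nodup) :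
    l.foldl pvAStep (cs, inds)
    = (PySem.Set.update cs l,
       inds ++ l.map (fun c => PySem.Int.toStr (((PySem.Set.update cs l).idxOf c : Nat) : Int))) := by
  induction l generalizing cs inds with
  | nil => simp [PySem.Set.update]
  | cons c l ih =>
    have hmem : c ∈ PySem.Set.add cs c := by simp [PySem.Set.mem_add]
    have hnd' : (PySem.Set.add cs c).Nodup := PySem.Set.nodup_add cs c hnd
    have hstep : pvAStep (cs, inds) c
        = (PySem.Set.add cs c,
           inds ++ [PySem.Int.toStr (((PySem.Set.add cs c).idxOf c : Nat) : Int)]) := by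
      show ((if !(decide (c ∈ cs)) then cs ++ [c] else cs), _) = _
      rw [pvCs_add]
      refine Prod.ext rfl ?_
      rw [pvInner_mem c (PySem.Set.add cs c) (-1) inds hnd' hmem]
      norm_num
    simp only [List.foldl_cons, hstep, ih _ _ hnd', PySem.Set.update_cons]
    refine Prod.ext rfl ?_
    simp only [List.map_cons, List.append_assoc, List.singleton_append]
    congr 3
    rw [pvIdxOf_update _ _ _ hmem]

-- ---------- B side ----------

def pvOcc (l : List Char) (c : Char) : List Int :=
  ((PySem.List.enumerate l).filter (fun q => q.2 == c)).map (fun q => q.1)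

theorem pvOcc_mem (l : List Char) (c : Char) (q : Nat) (hq : q < l.length) :
    ((q : Int) ∈ pvOcc l c ↔ l[q] = c) := by
  unfold pvOcc
  simp only [List.mem_map, List.mem_filter, PySem.List.mem_enumerate_iff]
  constructor
  · rintro ⟨p, ⟨⟨k, hk, rfl⟩, hc⟩, he⟩
    simp only [beq_iff_eq] at hc
    have : k = q := by
      have : ((0:Int) + k) = q := he
      omega
    subst this; exact hc
  · intro h
    exact ⟨((q : Int), l[q]), ⟨⟨q, hq, by simp⟩, by simp [h]⟩, rfl⟩

theorem pvOcc_nonneg (l : List Char) (c : Char) (p : Int) (h : p ∈ pvOcc l c) :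
    0 ≤ p ∧ p.toNat < l.length := by
  unfold pvOcc at h
  simp only [List.mem_map, List.mem_filter, PySem.List.mem_enumerate_iff] at h
  obtain ⟨x, ⟨⟨k, hk, rfl⟩, -⟩, rfl⟩ := h
  constructor
  · simp
  · simp; omega

theorem pvPositions_getD (l : List Char) (c : Char) :
    ((PySem.List.enumerate l).foldl (fun d q => d.modify q.2 [] (· ++ [q.1]))
      (PySem.Dict.empty : PySem.Dict Char (List Int))).getD c [] = pvOcc l c := by
  have hfold : (PySem.List.enumerate l).foldl (fun d q => d.modify q.2 [] (· ++ [q.1]))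
      (PySem.Dict.empty : PySem.Dict Char (List Int))
      = ((PySem.List.enumerate l).map (fun q => (q.2, q.1))).foldl
          (fun d p => d.modify p.1 [] (· ++ [p.2])) PySem.Dict.empty := by
    rw [List.foldl_map]
  rw [hfold, PySem.Dict.getD_foldl_modify_append]
  unfold pvOcc
  simp [List.filter_map, List.map_map, Function.comp_def]

theorem pvPositions_keys (l : List Char) :
    ((PySem.List.enumerate l).foldl (fun d q => d.modify q.2 [] (· ++ [q.1]))
      (PySem.Dict.empty : PySem.Dict Char (List Int))).keys = PySem.Set.ofList l := by
  rw [PySem.Dict.keys_foldl_modify_key (PySem.List.enumerate l) (fun q => q.2) [] (fun _ q v => v ++ [q.1]) PySem.Dict.empty]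
  simp [PySem.List.map_snd_enumerate, PySem.Set.update_nil_left]

theorem pvPositions_nodup (l : List Char) :
    ((PySem.List.enumerate l).foldl (fun d q => d.modify q.2 [] (· ++ [q.1]))
      (PySem.Dict.empty : PySem.Dict Char (List Int))).keys.Nodup := by
  rw [pvPositions_keys l]; exact PySem.Set.nodup_ofList l

theorem pvPositions_values (l : List Char) :
    ((PySem.List.enumerate l).foldl (fun d q => d.modify q.2 [] (· ++ [q.1]))
      (PySem.Dict.empty : PySem.Dict Char (List Int))).values
    = (PySem.Set.ofList l).map (pvOcc l) := by
  rw [PySem.Dict.values_eq_map_keys _ (pvPositions_nodup l) []]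
  rw [pvPositions_keys]
  exact List.map_congr_left (fun c _ => pvPositions_getD l c)

theorem pvSetFold_length (ps : List Int) (v : String) (o : List (Option String)) :
    (ps.foldl (fun o p => o.set p.toNat (some v)) o).length = o.length := by
  induction ps generalizing o with
  | nil => rfl
  | cons x rest ih => rw [List.foldl_cons, ih]; simp

theorem pvSetFold_get (ps : List Int) (v : String) (o : List (Option String)) (q : Nat)
    (hq : q < o.length) (hb : ∀ p ∈ ps, 0 ≤ p) :
    (ps.foldl (fun o p => o.set p.toNat (some v)) o)[q]?
    = if (q : Int) ∈ ps then some (some v) else o[q]? := by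
  induction ps generalizing o with
  | nil => simp
  | cons x rest ih =>
    have hx0 : 0 ≤ x := hb x (by simp)
    have hb2 : ∀ p ∈ rest, 0 ≤ p := fun p hp => hb p (List.mem_cons_of_mem _ hp)
    rw [List.foldl_cons]
    rw [ih (o.set x.toNat (some v)) (by simpa using hq) hb2]
    by_cases hm : (q : Int) ∈ rest
    · simp [hm]
    · simp only [hm, if_false, List.mem_cons]
      by_cases hqx : (q : Int) = x
      · have : x.toNat = q := by omega
        subst this
        simp [hqx, hq]
      · have hne : x.toNat ≠ q := by omega
        simp [hqx, List.getElem?_set_ne hne]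

def pvScatStep (o : List (Option String)) (g : Int × List Int) : List (Option String) :=
  g.2.foldl (fun o p => o.set p.toNat (some (PySem.Int.toStr g.1))) o

theorem pvScat_length (gs : List (Int × List Int)) (o : List (Option String)) :
    (gs.foldl pvScatStep o).length = o.length := by
  induction gs generalizing o with
  | nil => rfl
  | cons g rest ih => rw [List.foldl_cons, ih, pvScatStep, pvSetFold_length]

theorem pvScat_get_none (gs : List (Int × List Int)) (o : List (Option String)) (q : Nat)
    (hq : q < o.length) (hb : ∀ g ∈ gs, ∀ p ∈ g.2, 0 ≤ p)
    (hn : ∀ g ∈ gs, (q : Int) ∉ g.2) :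
    (gs.foldl pvScatStep o)[q]? = o[q]? := by
  induction gs generalizing o with
  | nil => rfl
  | cons g rest ih =>
    rw [List.foldl_cons]
    have h1 : (pvScatStep o g)[q]? = o[q]? := by
      rw [pvScatStep, pvSetFold_get _ _ _ q hq (hb g (by simp))]
      simp [hn g (by simp)]
    rw [ih (pvScatStep o g) (by rw [pvScatStep, pvSetFold_length]; exact hq)
      (fun g' hg' => hb g' (List.mem_cons_of_mem _ hg'))
      (fun g' hg' => hn g' (List.mem_cons_of_mem _ hg')), h1]

theorem pvScat_get_mem (gs₁ gs₂ : List (Int × List Int)) (g : Int × List Int)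
    (o : List (Option String)) (q : Nat) (hq : q < o.length)
    (hb : ∀ g' ∈ gs₁ ++ g :: gs₂, ∀ p ∈ g'.2, 0 ≤ p)
    (hg : (q : Int) ∈ g.2) (hn : ∀ g' ∈ gs₂, (q : Int) ∉ g'.2) :
    ((gs₁ ++ g :: gs₂).foldl pvScatStep o)[q]? = some (some (PySem.Int.toStr g.1)) := by
  rw [List.foldl_append, List.foldl_cons]
  set o1 := gs₁.foldl pvScatStep o with ho1
  have hlen1 : o1.length = o.length := pvScat_length _ _
  have hlen2 : (pvScatStep o1 g).length = o.length := by
    rw [pvScatStep, pvSetFold_length]; exact hlen1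
  rw [pvScat_get_none gs₂ (pvScatStep o1 g) q (by omega)
    (fun g' hg' => hb g' (by simp [List.mem_append, hg']))
    hn]
  rw [pvScatStep, pvSetFold_get _ _ _ q (by omega) (hb g (by simp))]
  simp [hg]

theorem pvScatter_eq (l : List Char) :
    (PySem.List.enumerate ((PySem.Set.ofList l).map (pvOcc l))).foldl
      (fun o g => g.2.foldl (fun o p => o.set p.toNat (some (PySem.Int.toStr g.1))) o)
      (List.replicate l.length (none : Option String))
    = l.map (fun c => some (PySem.Int.toStr (((PySem.Set.ofList l).idxOf c : Nat) : Int))) := by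
  show (PySem.List.enumerate ((PySem.Set.ofList l).map (pvOcc l))).foldl pvScatStep
      (List.replicate l.length (none : Option String)) = _
  set s := PySem.Set.ofList l with hs
  have hnd : s.Nodup := PySem.Set.nodup_ofList l
  have hb : ∀ g' ∈ PySem.List.enumerate (s.map (pvOcc l)), ∀ p ∈ g'.2, 0 ≤ p := by
    intro g' hg' p hp
    rw [PySem.List.mem_enumerate_iff] at hg'
    obtain ⟨k, hk, rfl⟩ := hg'
    simp only [List.getElem_map] at hp
    exact (pvOcc_nonneg l _ p hp).1
  apply List.ext_getElem?
  intro q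
  by_cases hq : q < l.length
  · -- q in range
    have hc : l[q] ∈ s := by rw [hs, PySem.Set.mem_ofList]; exact List.getElem_mem hq
    set r := s.idxOf l[q] with hr
    have hrlt : r < s.length := List.idxOf_lt_length_of_mem hc
    have hsr : s[r] = l[q] := List.getElem_idxOf hrlt
    -- split vs := s.map (pvOcc l) at r
    set vs := s.map (pvOcc l) with hvs
    have hrv : r < vs.length := by simpa [hvs] using hrlt
    have hsplit : vs = vs.take r ++ vs[r] :: vs.drop (r + 1) := by
      rw [List.getElem_cons_drop]; exact (List.take_append_drop r vs).symm
    have henum : PySem.List.enumerate vs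
        = PySem.List.enumerate (vs.take r) 0
          ++ ((r : Int), vs[r]) :: PySem.List.enumerate (vs.drop (r + 1)) (r + 1) := by
      conv_lhs => rw [show PySem.List.enumerate vs = PySem.List.enumerate vs 0 from rfl, hsplit]
      rw [PySem.List.enumerate_append, PySem.List.enumerate_cons]
      have hlen : (vs.take r).length = r := by simp [hrv.le]
      rw [hlen]
      norm_num
    rw [henum]
    have hgmem : (q : Int) ∈ ((r : Int), vs[r]).2 := by
      show (q : Int) ∈ vs[r]
      have : vs[r] = pvOcc l s[r] := by simp [hvs]
      rw [this, hsr]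
      exact (pvOcc_mem l l[q] q hq).mpr rfl
    have hn : ∀ g' ∈ PySem.List.enumerate (vs.drop (r + 1)) (r + 1), (q : Int) ∉ g'.2 := by
      intro g' hg'
      rw [PySem.List.mem_enumerate_iff] at hg'
      obtain ⟨k, hk, rfl⟩ := hg'
      show (q : Int) ∉ (vs.drop (r + 1))[k]
      have hklen : r + 1 + k < vs.length := by
        have := hk; simp only [List.length_drop] at this; omega
      have hdk : (vs.drop (r + 1))[k] = vs[r + 1 + k] := (List.getElem_drop' _).symm
      have hslen : r + 1 + k < s.length := by simpa [hvs] using hklen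
      have hvk : vs[r + 1 + k] = pvOcc l s[r + 1 + k] := by simp [hvs]
      rw [hdk, hvk]
      intro hmem
      have : l[q] = s[r + 1 + k] := (pvOcc_mem l _ q hq).mp hmem
      have : s[r] = s[r + 1 + k] := by rw [hsr, this]
      have := (hnd.getElem_inj_iff).mp this
      omega
    rw [pvScat_get_mem _ _ _ _ q (by simp [hq]) (by rw [← henum]; exact hb) hgmem hn]
    rw [List.getElem?_map]
    have : l[q]? = some l[q] := List.getElem?_eq_getElem hq
    rw [this]
    simp [hr]
  · -- out of range: both none
    have h1 : (List.map (fun c => some (PySem.Int.toStr (((s.idxOf c : Nat)) : Int))) l)[q]? = none := by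
      rw [List.getElem?_eq_none]; simpa using le_of_not_gt hq
    rw [h1, List.getElem?_eq_none]
    rw [pvScat_length]
    simpa using le_of_not_gt hq

-- ===== VERDICT =====

theorem createPhoneCode_spec : Claim_equal_createPhoneCode := by
  intro phoneCode _
  show createPhoneCode phoneCode = createPhoneCode_alt phoneCode
  unfold createPhoneCode createPhoneCode_alt
  simp only [pvMain phoneCode.toList [] [] List.nodup_nil, PySem.Set.update_nil_left,
    pvPositions_keys, pvPositions_values, pvScatter_eq, List.map_map, List.nil_append,
    Function.comp_def, Option.getD_some]
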